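-- pv_equiv track=rewrite | github.com/arkenidar/copyjumpvm | vm_programs/exporter.py | parse
-- ===== SOURCE A (Python) =====
-- def parse(code):
--     """Parses source code."""
--     lines = []
--     line_labels = {}
--     comment_ignore_mode = False
--     for line in code.split('\n'):
--
--         # handles multi-line comments
--         # (they begin in a line and end in another line,
--         # and the in-between is commented)
--
--         if line.strip() == '#begin:':
--             comment_ignore_mode = True
--             continue
--
--         if line.strip() == '#end:':
--             comment_ignore_mode = False
--             continue
--
--         if comment_ignore_mode:
--             continue
--
--         # pre-parsing
--         line = line.split("#")[0]  # skip comments (everything after a ';' character)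
--         line = line.strip()  # strip blank characters
--         if line == '':
--             continue  # skip empty lines
--
--         operands = line.split(' ')
--         if operands[0] != 'l':  # exclude line_labels (lines with label)
--             lines.append(line)
--         elif operands[0] == 'l':
--             line_labels[operands[1]] = len(lines)
--
--     # pre-defined line labels
--     line_labels['begin'] = 0
--     line_labels['end'] = len(lines)
--
--     return lines, line_labels
-- ===== SOURCE B (Python) =====
-- def parse(code):
--     """Parses source code (two-pass: comment filtering, then classification)."""
--     # pass 1: drop multi-line comment blocks, inline comments and blank lines
--     cleaned = []
--     ignore = False
--     for raw in code.split('\n'):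
--         s = raw.strip()
--         if s == '#begin:':
--             ignore = True
--         elif s == '#end:':
--             ignore = False
--         elif not ignore:
--             content = raw.split('#')[0].strip()
--             if content:
--                 cleaned.append(content)
--     # pass 2: classify cleaned lines into code lines and labels
--     lines = [ln for ln in cleaned if ln.split(' ')[0] != 'l']
--     line_labels = {}
--     count = 0
--     for ln in cleaned:
--         op = ln.split(' ')
--         if op[0] != 'l':
--             count += 1
--         else:
--             line_labels[op[1]] = count
--     line_labels['begin'] = 0
--     line_labels['end'] = len(lines)
--     return lines, line_labels
-- ===== Notes on version B (the rewrite author's own statement) =====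
-- stated objective: alternative
-- what changed: A's single stateful loop is split into two passes: a comment-filter pass producing the cleaned uncommented lines, then a classification pass building the code-line list (a comprehension) and the label map (a counter loop) from it.
import Mathlib
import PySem

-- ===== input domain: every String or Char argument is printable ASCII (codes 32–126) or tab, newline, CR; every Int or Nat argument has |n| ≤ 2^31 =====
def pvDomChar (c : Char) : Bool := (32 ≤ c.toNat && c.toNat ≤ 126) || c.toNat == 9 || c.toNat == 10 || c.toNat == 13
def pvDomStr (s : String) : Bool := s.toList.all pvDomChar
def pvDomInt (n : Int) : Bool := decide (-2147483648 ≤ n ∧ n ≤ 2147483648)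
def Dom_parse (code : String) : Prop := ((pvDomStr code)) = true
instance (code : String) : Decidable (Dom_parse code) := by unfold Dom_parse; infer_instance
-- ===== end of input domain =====

-- s.split(sep) for a literal nonempty sep: split? is always some there (exact)
def pvSplit (s sep : String) : List String := (PySem.Str.split? s sep).getD []

-- B restructures A's single stateful loop into two passes (comment filtering, then classification); alternative decomposition, same cost.

-- ===== PORT A =====
-- line.split('#')[0].strip(): split always yields a nonempty list, so [0] is headD ""
-- (exact); both Pythons compute this same expression, so both ports use this helper
def pvContent (line : String) : String :=
  PySem.Str.strip ((pvSplit line "#").headD "")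

-- operands[1]: exact on Pre_parse (the port's getD "" default is never used there,
-- since Pre_parse guarantees a second operand exists on every processed label line)
def parseLoopA : List String → List String → PySem.Dict String Int → Bool →
    List String × PySem.Dict String Int
  | [], lines, labels, _ => (lines, labels)
  | line :: rest, lines, labels, ign =>
    if PySem.Str.strip line == "#begin:" then parseLoopA rest lines labels true
    else if PySem.Str.strip line == "#end:" then parseLoopA rest lines labels false
    else if ign then parseLoopA rest lines labels ign
    else
      let l := pvContent line
      if l == "" then parseLoopA rest lines labels ign
      else
        let ops := pvSplit l " "
        if (ops.headD "") ≠ "l" then parseLoopA rest (lines ++ [l]) labels ign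
        else parseLoopA rest lines
          (labels.insert ((PySem.List.pyGet? ops 1).getD "") (lines.length : Int)) ign

def parse (code : String) : List String × (List (String × Int)) :=
  let r := parseLoopA (pvSplit code "\n") [] PySem.Dict.empty false
  (r.1, (((r.2.insert "begin" 0).insert "end" (r.1.length : Int))).items)

-- ===== PORT B =====
-- pass 1 of Source B: drop comment blocks, inline comments and blank lines
def parseClean : Bool → List String → List String
  | _, [] => []
  | ign, raw :: rest =>
    let s := PySem.Str.strip raw
    if s == "#begin:" then parseClean true rest
    else if s == "#end:" then parseClean false rest
    else if ign then parseClean ign rest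
    else
      let content := pvContent raw
      if content == "" then parseClean ign rest
      else content :: parseClean ign rest

def parseIsCode (ln : String) : Bool := ((pvSplit ln " ").headD "") ≠ "l"

-- pass 2 label loop of Source B (op[1]: getD "" exact on Pre_parse, as in port A)
def parseLabels : List String → PySem.Dict String Int → Int → PySem.Dict String Int
  | [], labels, _ => labels
  | ln :: rest, labels, cnt =>
    let op := pvSplit ln " "
    if (op.headD "") ≠ "l" then parseLabels rest labels (cnt + 1)
    else parseLabels rest (labels.insert ((PySem.List.pyGet? op 1).getD "") cnt) cnt

def parse_alt (code : String) : List String × (List (String × Int)) :=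
  let cleaned := parseClean false (pvSplit code "\n")
  let lines := cleaned.filter parseIsCode
  let labels := parseLabels cleaned PySem.Dict.empty 0
  (lines, (((labels.insert "begin" 0).insert "end" (lines.length : Int))).items)

-- ===== PRECONDITION & SPEC =====
-- Pre_parse excludes inputs containing a line whose comment-stripped content is exactly "l":
-- on such lines outside comment blocks Python A raises IndexError (operands[1]); for simplicity
-- the condition also excludes such lines inside #begin:/#end: comment blocks (where A returns
-- normally) — a slight stated narrowing that avoids replaying the comment-mode state.
def Pre_parse (code : String) : Prop :=
  ∀ line ∈ pvSplit code "\n", pvContent line ≠ "l"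
instance (code : String) : Decidable (Pre_parse code) := by unfold Pre_parse; infer_instance
def pvWitness_parse : String := "x 1\nl foo\n# c\ny"
def Spec_parse (code : String) (out : List String × (List (String × Int))) : Prop := out = parse_alt code
instance (code : String) (out : List String × (List (String × Int))) : Decidable (Spec_parse code out) := by unfold Spec_parse; infer_instance

-- ===== CLAIM (what is proved, stated in full; the proofs are below) =====
def Claim_equal_parse : Prop := ∀ (code : String), Dom_parse code → Pre_parse code → Spec_parse code (parse code)

-- ===== LEMMAS AND PROOFS =====

-- A's fused loop equals B's two passes, for any starting state
theorem parseLoopA_eq (ls : List String) :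
    ∀ (lines : List String) (labels : PySem.Dict String Int) (ign : Bool),
    parseLoopA ls lines labels ign =
      (lines ++ (parseClean ign ls).filter parseIsCode,
       parseLabels (parseClean ign ls) labels (lines.length : Int)) := by
  induction ls with
  | nil => intro lines labels ign; simp [parseLoopA, parseClean, parseLabels]
  | cons line rest ih =>
    intro lines labels ign
    by_cases h1 : PySem.Str.strip line = "#begin:"
    · simp [parseLoopA, parseClean, h1, ih]
    · by_cases h2 : PySem.Str.strip line = "#end:"
      · simp [parseLoopA, parseClean, h2, ih]
      · by_cases h3 : ign
        · simp [parseLoopA, parseClean, h1, h2, h3, ih]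
        · by_cases h4 : pvContent line = ""
          · simp [parseLoopA, parseClean, h1, h2, h3, h4, ih]
          · by_cases h5 : ((pvSplit (pvContent line) " ").head?.getD "") = "l"
            · have hc : parseIsCode (pvContent line) = false := by
                simp [parseIsCode, h5]
              have hstep : parseLoopA (line :: rest) lines labels ign =
                  parseLoopA rest lines
                    (labels.insert ((PySem.List.pyGet? (pvSplit (pvContent line) " ") 1).getD "")
                      (lines.length : Int)) ign := by
                simp only [parseLoopA]
                rw [if_neg (by simp [h1]), if_neg (by simp [h2]), if_neg (by simp [h3]),
                  if_neg (by simp [h4]), if_neg (by simp [h5])]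
              have hclean : parseClean ign (line :: rest) = pvContent line :: parseClean ign rest := by
                cases Bool.of_not_eq_true h3
                simp only [parseClean]
                rw [if_neg (by simp [h1]), if_neg (by simp [h2]), if_neg (by simp),
                  if_neg (by simp [h4])]
              rw [hstep, hclean, ih]
              simp only [List.filter_cons, hc, Bool.false_eq_true, if_false, parseLabels]
              split_ifs with hq
              · exact absurd (by simpa using h5) hq
              · rfl
            · have hc : parseIsCode (pvContent line) = true := by
                simp [parseIsCode, h5]
              have hstep : parseLoopA (line :: rest) lines labels ign =
                  parseLoopA rest (lines ++ [pvContent line]) labels ign := by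
                simp only [parseLoopA]
                rw [if_neg (by simp [h1]), if_neg (by simp [h2]), if_neg (by simp [h3]),
                  if_neg (by simp [h4]), if_pos (by simp [h5])]
              have hclean : parseClean ign (line :: rest) = pvContent line :: parseClean ign rest := by
                cases Bool.of_not_eq_true h3
                simp only [parseClean]
                rw [if_neg (by simp [h1]), if_neg (by simp [h2]), if_neg (by simp),
                  if_neg (by simp [h4])]
              rw [hstep, hclean, ih]
              simp only [List.filter_cons, hc, parseLabels]
              rw [if_pos trivial]
              split_ifs with hq
              case neg => exact absurd (by simpa using not_not.mp hq) h5
              have hlen : (((lines ++ [pvContent line]).length : Int)) = (lines.length : Int) + 1 := by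
                simp
              simp only [List.append_assoc, List.singleton_append, hlen]

-- ===== VERDICT (by name: the statement is the Claim_ definition above) =====
theorem parse_spec : Claim_equal_parse := by
  intro code _ _
  show parse code = parse_alt code
  simp [parse, parse_alt, parseLoopA_eq]
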